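-- pv_equiv track=rewrite | github.com/cemead/py-check | the-ship-teams.py | two_teams
-- ===== SOURCE A (Python) =====
-- def two_teams(sailors):
--     # declare empty variables
--     boat1 = []
--     boat2 = []
--     # go through the list of sailors
--     for sailor in sailors:
--         #  those who are elder than 40 y.o. or younger than 20, should be on the first ship
--         if sailors[sailor] < 20 or sailors[sailor] > 40:
--             # add them to the first boat
--             boat1.append(sailor)
--         # everyone else goes on the second
--         else:
--             boat2.append(sailor)
--     return [
--             # return the results in alphabetical order
--             sorted(boat1),
--             sorted(boat2)
--             ]
-- ===== SOURCE B (Python) =====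
-- def two_teams(sailors):
--     # Decorate-sort-split: prepend a boat tag character ("0" = boat1, "1" = boat2)
--     # to every name, sort the decorated strings once (tag is the primary key, name
--     # the secondary), locate the boundary, and undecorate the two slices.
--     tagged = sorted(("1" if 20 <= age <= 40 else "0") + name
--                     for name, age in sailors.items())
--     k = 0
--     while k < len(tagged) and tagged[k][0] == "0":
--         k += 1
--     return [[s[1:] for s in tagged[:k]], [s[1:] for s in tagged[k:]]]
-- ===== Notes on version B (the rewrite author's own statement) =====
-- stated objective: alternative
-- what changed: B uses decorate-sort-split: it prepends a boat-tag character to every name, sorts the decorated strings once under a single composite key, finds the tag boundary with a scan and undecorates the two slices, instead of A's predicate-branching partition loop followed by two separate per-boat sorts.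
import Mathlib
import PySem

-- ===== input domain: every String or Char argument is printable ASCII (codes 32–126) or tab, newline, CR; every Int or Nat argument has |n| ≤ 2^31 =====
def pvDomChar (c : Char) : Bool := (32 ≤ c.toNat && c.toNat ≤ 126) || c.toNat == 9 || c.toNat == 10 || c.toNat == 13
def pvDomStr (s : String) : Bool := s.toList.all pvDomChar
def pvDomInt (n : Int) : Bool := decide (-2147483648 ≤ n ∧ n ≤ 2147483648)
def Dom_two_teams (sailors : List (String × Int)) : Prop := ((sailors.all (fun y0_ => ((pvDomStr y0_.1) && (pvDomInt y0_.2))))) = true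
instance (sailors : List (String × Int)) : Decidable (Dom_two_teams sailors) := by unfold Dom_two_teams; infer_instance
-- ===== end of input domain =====

-- B decorate-sort-splits: it tags every name with a boat character, sorts the decorated strings
-- once, cuts at the boundary and undecorates — instead of A's partitioning pass plus two per-boat
-- sorts; same return value on every duplicate-free association list.

-- ===== PORT A =====
def two_teams (sailors : List (String × Int)) : List (List String) :=
  -- boat1 = []; boat2 = []; for sailor in sailors: ...  (iterating a dict yields its keys)
  let r := (sailors.map Prod.fst).foldl
    (fun (b : List String × List String) sailor =>
      -- sailors[sailor] (key always present while iterating the dict)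
      if PySem.Dict.getD (PySem.Dict.ofList sailors) sailor (0 : Int) < 20 ∨ PySem.Dict.getD (PySem.Dict.ofList sailors) sailor (0 : Int) > 40 then
        (b.1 ++ [sailor], b.2)
      else
        (b.1, b.2 ++ [sailor]))
    ([], [])
  [PySem.List.sorted r.1 (fun x => x) false, PySem.List.sorted r.2 (fun x => x) false]

-- ===== PORT B =====
-- '("1" if 20 <= age <= 40 else "0") + name' — '+' on str is '++' on the code-point lists (exact)
def pvTagged (p : String × Int) : String :=
  String.ofList ((if 20 ≤ p.2 ∧ p.2 ≤ 40 then ['1'] else ['0']) ++ p.1.toList)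

-- 'k = 0; while k < len(tagged) and tagged[k][0] == "0": k += 1' — counts the leading "0"-tagged entries
def pvSplitIdx : List String → Nat
  | [] => 0
  | s :: rest => if PySem.Str.pyGet? s 0 = some '0' then pvSplitIdx rest + 1 else 0

def two_teams_alt (sailors : List (String × Int)) : List (List String) :=
  -- tagged = sorted(...)  (iterating sailors.items() is the association list itself)
  let tagged := PySem.List.sorted (sailors.map pvTagged) (fun x => x) false
  let k := pvSplitIdx tagged
  -- [[s[1:] for s in tagged[:k]], [s[1:] for s in tagged[k:]]]
  [ (PySem.List.slice tagged none (some (k : Int))).map (fun s => PySem.Str.slice s (some 1) none),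
    (PySem.List.slice tagged (some (k : Int)) none).map (fun s => PySem.Str.slice s (some 1) none) ]

-- ===== PRECONDITION & SPEC =====
-- Pre_ excludes association lists with duplicate keys: a Python dict cannot contain two entries
-- with the same key, so such lists encode no input the Python functions can receive.
def Pre_two_teams (sailors : List (String × Int)) : Prop := (sailors.map Prod.fst).Nodup
instance (sailors : List (String × Int)) : Decidable (Pre_two_teams sailors) := by
  unfold Pre_two_teams; infer_instance
def pvWitness_two_teams : (List (String × Int)) := [("ann", 50), ("bob", 30), ("al", 10)]

def Spec_two_teams (sailors : List (String × Int)) (out : List (List String)) : Prop := out = two_teams_alt sailors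
instance (sailors : List (String × Int)) (out : List (List String)) : Decidable (Spec_two_teams sailors out) := by unfold Spec_two_teams; infer_instance

-- ===== CLAIM (what is proved, stated in full; the proofs are below) =====
def Claim_equal_two_teams : Prop := ∀ (sailors : List (String × Int)), Dom_two_teams sailors → Pre_two_teams sailors → Spec_two_teams sailors (two_teams sailors)

-- ===== LEMMAS AND PROOFS =====

-- the partitioning fold splits a key list into (keys satisfying q, keys failing q), in order
lemma pv_fold_split (q : String → Prop) [DecidablePred q] (ks : List String)
    (b : List String × List String) :
    ks.foldl (fun (b : List String × List String) n =>
        if q n then (b.1 ++ [n], b.2) else (b.1, b.2 ++ [n])) b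
      = (b.1 ++ ks.filter (fun n => decide (q n)),
         b.2 ++ ks.filter (fun n => !decide (q n))) := by
  induction ks generalizing b with
  | nil => simp
  | cons x t ih =>
    by_cases hx : q x <;> simp [List.foldl_cons, hx, ih]

-- on a duplicate-free key list, sorting is strictly increasing
lemma pv_sorted_strict (ks : List String) (h : ks.Nodup) :
    (PySem.List.sorted ks (fun x => x) false).Pairwise (· < ·) := by
  have hle := PySem.List.sorted_pairwise ks (fun x => x)
  have hnd : (PySem.List.sorted ks (fun x => x) false).Nodup :=
    (PySem.List.sorted_perm ks (fun x => x) false).nodup_iff.mpr h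
  exact (hle.and hnd).imp (fun hab => lt_of_le_of_ne hab.1 hab.2)

-- with duplicate-free keys, the dict built from the association list returns each pair's value
lemma pv_getD_ofList (sailors : List (String × Int)) (h : (sailors.map Prod.fst).Nodup)
    {n : String} {v : Int} (hm : (n, v) ∈ sailors) :
    PySem.Dict.getD (PySem.Dict.ofList sailors) n 0 = v := by
  have hitems : (PySem.Dict.ofList sailors).items = sailors := by
    have := PySem.Dict.items_foldl_insert_fresh (l := sailors) (d := PySem.Dict.empty)
      (k := Prod.fst) (v := Prod.snd) (fun a _ => rfl) h
    simpa [PySem.Dict.ofList] using this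
  refine PySem.Dict.getD_of_mem_items _ ?_ (PySem.Dict.nodup_keys_ofList sailors) 0
  rw [hitems]; exact hm

-- a "0"-decorated string is lexicographically below every "1"-decorated one
lemma pv_cons_lt (a b : String) :
    String.ofList ('0' :: a.toList) < String.ofList ('1' :: b.toList) := by
  rw [String.lt_iff_toList_lt]
  simp only [String.toList_ofList]
  rw [List.cons_lt_cons_iff]
  exact Or.inl (by decide)

-- decorating with the same tag preserves strict order
lemma pv_cons_lt_same (c : Char) {a b : String} (hab : a < b) :
    String.ofList (c :: a.toList) < String.ofList (c :: b.toList) := by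
  rw [String.lt_iff_toList_lt] at hab ⊢
  simp [String.toList_ofList, hab]

-- stripping the decoration character gives the name back
lemma pv_undecorate (c : Char) (n : String) :
    PySem.Str.slice (String.ofList (c :: n.toList)) (some 1) none = n := by
  rw [← String.toList_inj]
  simp [PySem.Str.toList_slice, String.toList_ofList, PySem.List.slice_from_one]

-- the split counter on a "0"-block followed by a "1"-block returns the first block's length
lemma pv_splitIdx_append (A B : List String)
    (hA : ∀ s ∈ A, ∃ t, s = String.ofList ('0' :: t)) (hB : ∀ s ∈ B, ∃ t, s = String.ofList ('1' :: t)) :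
    pvSplitIdx (A ++ B) = A.length := by
  induction A with
  | nil =>
    cases B with
    | nil => rfl
    | cons s rest =>
      obtain ⟨t, rfl⟩ := hB s (by simp)
      simp [pvSplitIdx, String.toList_ofList]
  | cons s A ih =>
    have ih' := ih (fun x hx => hA x (by simp [hx]))
    obtain ⟨t, rfl⟩ := hA s (by simp)
    simp [pvSplitIdx, String.toList_ofList, ih']

-- sorting the tag-decorated strings yields the sorted "0"-block followed by the sorted "1"-block
lemma pv_sorted_tagged (ks : List String) (h : ks.Nodup) (q : String → Prop) [DecidablePred q] :
    PySem.List.sorted (ks.map (fun n => if q n then String.ofList ('0' :: n.toList) else String.ofList ('1' :: n.toList))) (fun x => x) false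
      = (PySem.List.sorted (ks.filter (fun n => decide (q n))) (fun x => x) false).map (fun n => String.ofList ('0' :: n.toList))
        ++ (PySem.List.sorted (ks.filter (fun n => !decide (q n))) (fun x => x) false).map (fun n => String.ofList ('1' :: n.toList)) := by
  set L1 := PySem.List.sorted (ks.filter (fun n => decide (q n))) (fun x => x) false with hL1
  set L2 := PySem.List.sorted (ks.filter (fun n => !decide (q n))) (fun x => x) false with hL2
  apply PySem.List.sorted_eq_of_perm_of_pairwise_lt
  · -- permutation
    have p1 : L1.Perm (ks.filter (fun n => decide (q n))) :=
      PySem.List.sorted_perm _ _ _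
    have p2 : L2.Perm (ks.filter (fun n => !decide (q n))) :=
      PySem.List.sorted_perm _ _ _
    have e1 : (ks.filter (fun n => decide (q n))).map (fun n => String.ofList ('0' :: n.toList))
        = (ks.filter (fun n => decide (q n))).map (fun n => if q n then String.ofList ('0' :: n.toList) else String.ofList ('1' :: n.toList)) := by
      apply List.map_congr_left
      intro n hn
      have := List.of_mem_filter hn
      simp_all
    have e2 : (ks.filter (fun n => !decide (q n))).map (fun n => String.ofList ('1' :: n.toList))
        = (ks.filter (fun n => !decide (q n))).map (fun n => if q n then String.ofList ('0' :: n.toList) else String.ofList ('1' :: n.toList)) := by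
      apply List.map_congr_left
      intro n hn
      have := List.of_mem_filter hn
      simp_all
    refine ((p1.map _).append (p2.map _)).trans ?_
    rw [e1, e2, ← List.map_append]
    exact (List.filter_append_perm _ ks).map _
  · -- strictly increasing
    rw [List.pairwise_append]
    refine ⟨?_, ?_, ?_⟩
    · rw [List.pairwise_map]
      exact (pv_sorted_strict _ (h.filter _)).imp (pv_cons_lt_same '0')
    · rw [List.pairwise_map]
      exact (pv_sorted_strict _ (h.filter _)).imp (pv_cons_lt_same '1')
    · intro x hx y hy
      simp only [List.mem_map] at hx hy
      obtain ⟨a, -, rfl⟩ := hx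
      obtain ⟨b, -, rfl⟩ := hy
      exact pv_cons_lt _ _

-- ===== VERDICT (by name: the statement is the Claim_ definition above) =====
theorem two_teams_spec : Claim_equal_two_teams := by
  intro sailors _ hpre
  unfold Spec_two_teams two_teams two_teams_alt
  have hpre' : (sailors.map Prod.fst).Nodup := hpre
  set ks := sailors.map Prod.fst with hks
  set q : String → Prop := fun n =>
    PySem.Dict.getD (PySem.Dict.ofList sailors) n (0 : Int) < 20 ∨
    PySem.Dict.getD (PySem.Dict.ofList sailors) n (0 : Int) > 40 with hq
  -- A's partitioning fold
  rw [pv_fold_split q ks]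
  set L1 := PySem.List.sorted (ks.filter (fun n => decide (q n))) (fun x => x) false with hL1
  set L2 := PySem.List.sorted (ks.filter (fun n => !decide (q n))) (fun x => x) false with hL2
  -- B's decorated list is the tag-decorated key list
  have htag : sailors.map pvTagged
      = ks.map (fun n => if q n then String.ofList ('0' :: n.toList) else String.ofList ('1' :: n.toList)) := by
    rw [hks, List.map_map]
    apply List.map_congr_left
    intro p hp
    have hv := pv_getD_ofList sailors hpre' hp
    simp only [Function.comp, pvTagged, hq, hv]
    by_cases h20 : 20 ≤ p.2 ∧ p.2 ≤ 40
    · rw [if_pos h20, if_neg (by omega)]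
      rfl
    · rw [if_neg h20, if_pos (by omega)]
      rfl
  -- B's sorted decorated list is the sorted "0"-block followed by the sorted "1"-block
  have hsorted : PySem.List.sorted (sailors.map pvTagged) (fun x => x) false
      = (L1.map (fun n => String.ofList ('0' :: n.toList))) ++ (L2.map (fun n => String.ofList ('1' :: n.toList))) := by
    rw [htag]
    exact pv_sorted_tagged ks hpre' q
  -- the boundary index is the length of the "0"-block
  have hsplit : pvSplitIdx ((L1.map (fun n => String.ofList ('0' :: n.toList))) ++ (L2.map (fun n => String.ofList ('1' :: n.toList))))
      = (L1.map (fun n => String.ofList ('0' :: n.toList))).length :=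
    pv_splitIdx_append _ _
      (by intro s hs; simp only [List.mem_map] at hs; obtain ⟨a, -, rfl⟩ := hs; exact ⟨_, rfl⟩)
      (by intro s hs; simp only [List.mem_map] at hs; obtain ⟨a, -, rfl⟩ := hs; exact ⟨_, rfl⟩)
  -- the two slices are the two blocks; undecorating gives back the sorted name lists
  simp only [hsorted, hsplit, PySem.List.slice_to_natCast, PySem.List.slice_from_natCast,
    List.take_left, List.drop_left, List.map_map]
  simp [Function.comp_def, pv_undecorate]
  exact ⟨hL1.symm, hL2.symm⟩
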